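-- pv_equiv track=rewrite | github.com/Yawn-Sean/Daily_CF_Problems | daily_problems/2025/04/0414/personal_submission/cf630m_liryc.py | solve
-- ===== SOURCE A (Python) =====
-- def solve(x: int) -> int:
--     x %= 360
--     d = 360
--     ans = -1
--
--     for i, r in enumerate([0, 90, 180, 270]):
--         v = (x - r) % 360
--         v = min(v, 360 - v)
--         if v < d:
--             d, ans = v, i
--     return ans
-- ===== SOURCE B (Python) =====
-- def solve(x: int) -> int:
--     x %= 360
--     if x <= 45 or x >= 315:
--         return 0
--     elif x <= 135:
--         return 1
--     elif x <= 225: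
--         return 2
--     else:
--         return 3
-- ===== Notes on version B (the rewrite author's own statement) =====
-- stated objective: simpler
-- what changed: Replaced the argmin loop over the four cardinal angles (circular distances with a running minimum) by a direct branch chain classifying the reduced angle into its four sectors.
import Mathlib
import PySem

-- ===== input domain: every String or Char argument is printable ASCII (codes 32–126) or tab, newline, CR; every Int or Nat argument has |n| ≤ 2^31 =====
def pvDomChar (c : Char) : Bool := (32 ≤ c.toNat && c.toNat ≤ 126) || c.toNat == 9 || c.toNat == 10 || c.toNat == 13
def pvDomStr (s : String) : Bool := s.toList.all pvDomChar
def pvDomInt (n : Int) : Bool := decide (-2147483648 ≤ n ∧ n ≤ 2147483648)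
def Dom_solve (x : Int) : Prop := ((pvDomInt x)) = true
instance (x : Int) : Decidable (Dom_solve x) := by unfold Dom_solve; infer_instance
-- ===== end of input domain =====

-- B replaces A's argmin loop over the four cardinal angles by a direct
-- branch chain classifying the reduced angle into its four sectors (simpler).

-- ===== PORT A =====
def solve (x : Int) : Int :=
  let x := PySem.Int.mod x 360
  (([(0, 0), (1, 90), (2, 180), (3, 270)] : List (Int × Int)).foldl
    (fun (st : Int × Int) (p : Int × Int) =>
      let v := PySem.Int.mod (x - p.2) 360
      let v := min v (360 - v)
      if v < st.1 then (v, p.1) else st)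
    (360, -1)).2

-- ===== PORT B =====
def solve_alt (x : Int) : Int :=
  let x := PySem.Int.mod x 360
  if x ≤ 45 ∨ 315 ≤ x then 0
  else if x ≤ 135 then 1
  else if x ≤ 225 then 2
  else 3

-- ===== PRECONDITION & SPEC =====
def Spec_solve (x : Int) (out : Int) : Prop := out = solve_alt x
instance (x : Int) (out : Int) : Decidable (Spec_solve x out) := by unfold Spec_solve; infer_instance

-- ===== CLAIM (what is proved, stated in full; the proofs are below) =====
def Claim_equal_solve : Prop := ∀ (x : Int), Dom_solve x → Spec_solve x (solve x)

-- ===== LEMMAS AND PROOFS =====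

-- Both ports depend on x only through x % 360; they agree on each residue.
set_option maxRecDepth 100000 in
theorem solve_eq_alt_of_range : ∀ n : Fin 360, solve (n : Int) = solve_alt (n : Int) := by
  decide

theorem mod_mod_self (x : Int) : PySem.Int.mod (PySem.Int.mod x 360) 360 = PySem.Int.mod x 360 := by
  have h0 : (0:Int) < 360 := by norm_num
  have h1 := PySem.Int.mod_nonneg x h0
  have h2 := PySem.Int.mod_lt x h0
  rw [PySem.Int.mod_eq_emod_of_pos h0, PySem.Int.mod_eq_emod_of_pos h0]
  omega

theorem solve_mod (x : Int) : solve x = solve (PySem.Int.mod x 360) := by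
  unfold solve
  rw [mod_mod_self]

theorem solve_alt_mod (x : Int) : solve_alt x = solve_alt (PySem.Int.mod x 360) := by
  unfold solve_alt
  rw [mod_mod_self]

-- ===== VERDICT (by name: the statement is the Claim_ definition above) =====
theorem solve_spec : Claim_equal_solve := by
  intro x _
  unfold Spec_solve
  rw [solve_mod, solve_alt_mod]
  have h0 : (0:Int) < 360 := by norm_num
  have h1 := PySem.Int.mod_nonneg x h0
  have h2 := PySem.Int.mod_lt x h0
  have hn : (((⟨(PySem.Int.mod x 360).toNat, by omega⟩ : Fin 360) : Nat) : Int) = PySem.Int.mod x 360 := by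
    simp
    omega
  rw [← hn]
  exact solve_eq_alt_of_range _
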